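-- pv_equiv track=rewrite | github.com/ravenoak/devsynth | scripts/standardize_test_markers.py | prioritize_files
-- ===== SOURCE A (Python) =====
-- def prioritize_files(files: list[str], priority_modules: list[str]) -> list[str]:
--     """
--     Prioritize files based on module priority.
--
--     Args:
--         files: List of file paths
--         priority_modules: List of high-priority modules
--
--     Returns:
--         Prioritized list of file paths
--     """
--     high_priority = []
--     normal_priority = []
--
--     for file in files:
--         if any(file.startswith(module) for module in priority_modules):
--             high_priority.append(file)
--         else:
--             normal_priority.append(file)
--
--     return high_priority + normal_priority
-- ===== SOURCE B (Python) =====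
-- def prioritize_files(files: list[str], priority_modules: list[str]) -> list[str]:
--     # Stable sort by a 0/1 key: priority files keep their relative order
--     # and come first, the rest follow in original order.
--     return sorted(
--         files,
--         key=lambda file: 0 if any(file.startswith(module) for module in priority_modules) else 1,
--     )
-- ===== Notes on version B (the rewrite author's own statement) =====
-- stated objective: idiomatic
-- what changed: Replaced the two-accumulator partition loop with a single stable sort over a 0/1 priority key, relying on sort stability to preserve relative order within each group.
import Mathlib
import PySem

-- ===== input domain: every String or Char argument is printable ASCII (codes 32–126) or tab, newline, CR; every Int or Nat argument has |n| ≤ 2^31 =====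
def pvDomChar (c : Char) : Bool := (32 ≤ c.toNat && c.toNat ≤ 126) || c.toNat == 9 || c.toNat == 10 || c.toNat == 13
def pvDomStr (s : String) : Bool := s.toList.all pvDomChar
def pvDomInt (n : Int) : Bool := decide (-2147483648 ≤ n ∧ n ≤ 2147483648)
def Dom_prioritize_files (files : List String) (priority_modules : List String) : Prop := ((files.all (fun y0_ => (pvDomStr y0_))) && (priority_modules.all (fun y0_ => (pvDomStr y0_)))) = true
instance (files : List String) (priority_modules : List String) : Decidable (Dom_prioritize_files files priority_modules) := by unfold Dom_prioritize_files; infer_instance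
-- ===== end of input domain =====

-- B replaces A's two-accumulator partition loop with one stable sort over a 0/1 priority key (idiomatic, same observable behaviour).

-- ===== PORT A =====
-- A: loop over files with two accumulators, append to one or the other, return hi ++ lo.
def prioritize_files (files : List String) (priority_modules : List String) : List String :=
  let st := files.foldl
    (fun (st : List String × List String) file =>
      if priority_modules.any (fun module => PySem.Str.startswith file module) then
        (st.1 ++ [file], st.2)
      else
        (st.1, st.2 ++ [file]))
    ([], [])
  st.1 ++ st.2

-- ===== PORT B =====
-- B: sorted(files, key=lambda file: 0 if any(file.startswith(m) for m in priority_modules) else 1)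
def prioritize_files_alt (files : List String) (priority_modules : List String) : List String :=
  PySem.List.sorted files
    (fun file =>
      if priority_modules.any (fun module => PySem.Str.startswith file module) then (0 : Int) else 1)
    false

-- ===== PRECONDITION & SPEC =====
def Spec_prioritize_files (files : List String) (priority_modules : List String) (out : List String) : Prop := out = prioritize_files_alt files priority_modules
instance (files : List String) (priority_modules : List String) (out : List String) : Decidable (Spec_prioritize_files files priority_modules out) := by unfold Spec_prioritize_files; infer_instance

-- ===== CLAIM (what is proved, stated in full; the proofs are below) =====
def Claim_equal_prioritize_files : Prop := ∀ (files : List String) (priority_modules : List String), Dom_prioritize_files files priority_modules → Spec_prioritize_files files priority_modules (prioritize_files files priority_modules)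

-- ===== LEMMAS AND PROOFS =====

-- the 0/1 key for a boolean predicate
def pvKey (p : String → Bool) (x : String) : Int := if p x then 0 else 1

-- inserting a key-0 element into (hi ++ lo), all of hi key 0 and all of lo key 1, lands between them
theorem pv_insert_true (p : String → Bool) (x : String) (hx : p x = true) :
    ∀ (hi lo : List String), (∀ y ∈ hi, p y = true) → (∀ y ∈ lo, p y = false) →
    PySem.List.insertBy (fun a b => decide (pvKey p a < pvKey p b)) x (hi ++ lo)
      = hi ++ x :: lo := by
  intro hi
  induction hi with
  | nil =>
    intro lo _ hlo
    cases lo with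
    | nil => simp [PySem.List.insertBy]
    | cons y ys =>
      have hy : p y = false := hlo y (by simp)
      simp [PySem.List.insertBy, pvKey, hx, hy]
  | cons h t ih =>
    intro lo hhi hlo
    have hh : p h = true := hhi h (by simp)
    have : PySem.List.insertBy (fun a b => decide (pvKey p a < pvKey p b)) x (h :: (t ++ lo))
        = h :: PySem.List.insertBy (fun a b => decide (pvKey p a < pvKey p b)) x (t ++ lo) := by
      simp [PySem.List.insertBy, pvKey, hx, hh]
    simpa [this] using congrArg (h :: ·) (ih lo (fun y hy => hhi y (by simp [hy])) hlo)

-- inserting a key-1 element goes to the very end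
theorem pv_insert_false (p : String → Bool) (x : String) (hx : p x = false)
    (hi lo : List String) (hhi : ∀ y ∈ hi, p y = true) (hlo : ∀ y ∈ lo, p y = false) :
    PySem.List.insertBy (fun a b => decide (pvKey p a < pvKey p b)) x (hi ++ lo)
      = hi ++ (lo ++ [x]) := by
  have := PySem.List.insertBy_of_forall_not_before
      (fun a b => decide (pvKey p a < pvKey p b)) x (hi ++ lo)
      (by
        intro y hy
        have : pvKey p y ≤ 1 := by
          unfold pvKey; split <;> omega
        simp only [decide_eq_false_iff_not, not_lt]
        unfold pvKey at *
        simp [hx]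
        omega)
  simpa [List.append_assoc] using this

-- main loop invariant: the insertion-sort fold from hi ++ lo tracks A's two-accumulator fold
theorem pv_main (p : String → Bool) :
    ∀ (files hi lo : List String), (∀ y ∈ hi, p y = true) → (∀ y ∈ lo, p y = false) →
    files.foldl (fun acc x => PySem.List.insertBy (fun a b => decide (pvKey p a < pvKey p b)) x acc) (hi ++ lo)
      = (files.foldl (fun (st : List String × List String) file =>
          if p file then (st.1 ++ [file], st.2) else (st.1, st.2 ++ [file])) (hi, lo)).1
        ++ (files.foldl (fun (st : List String × List String) file =>
          if p file then (st.1 ++ [file], st.2) else (st.1, st.2 ++ [file])) (hi, lo)).2 := by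
  intro files
  induction files with
  | nil => intro hi lo _ _; simp
  | cons f rest ih =>
    intro hi lo hhi hlo
    by_cases hf : p f = true
    · have h1 := pv_insert_true p f hf hi lo hhi hlo
      have h2 := ih (hi ++ [f]) lo
        (by intro y hy; rcases List.mem_append.1 hy with h | h
            · exact hhi y h
            · simp at h; simpa [h] using hf)
        hlo
      simp only [List.foldl_cons, hf, if_pos, h1]
      simpa using h2
    · have hf' : p f = false := by simpa using hf
      have h1 := pv_insert_false p f hf' hi lo hhi hlo
      have h2 := ih hi (lo ++ [f]) hhi
        (by intro y hy; rcases List.mem_append.1 hy with h | h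
            · exact hlo y h
            · simp at h; simpa [h] using hf')
      simp only [List.foldl_cons, hf', if_neg, h1]
      simpa [List.append_assoc] using h2

-- ===== VERDICT (by name: the statement is the Claim_ definition above) =====
theorem prioritize_files_spec : Claim_equal_prioritize_files := by
  unfold Claim_equal_prioritize_files Spec_prioritize_files
  intro files priority_modules _
  unfold prioritize_files prioritize_files_alt
  have := pv_main (fun file => priority_modules.any (fun module => PySem.Str.startswith file module))
    files [] [] (by simp) (by simp)
  rw [PySem.List.sorted]
  simp only [if_neg (by decide : ¬ (false = true))]
  simpa [pvKey] using this.symm
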